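-- pv_equiv track=rewrite | github.com/aghie/parsing-as-pretraining | tree2labels/encoding2multitask_int.py | to_absolute_levels
-- ===== SOURCE A (Python) =====
-- def to_absolute_levels(relative_levels):
--
--     absolute_sequence = [0]*len(relative_levels)
--     current_level = 0
--     for j,level in enumerate(relative_levels):
--
--         if level in ["-BOS-","-EOS-", "NONE"]:
--             absolute_sequence[j] = level
--         elif level == "ROOT":
--             absolute_sequence[j] = "1"
--             current_level+=1
--         else:
--             current_level+= int(level)
--             absolute_sequence[j] = str(current_level)
--     return absolute_sequence
-- ===== SOURCE B (Python) =====
-- def to_absolute_levels(relative_levels):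
--     sentinels = ("-BOS-", "-EOS-", "NONE")
--     contribs = [0 if lv in sentinels else 1 if lv == "ROOT" else int(lv)
--                 for lv in relative_levels]
--     totals = []
--     t = 0
--     for c in contribs:
--         t += c
--         totals.append(t)
--     return [lv if lv in sentinels else "1" if lv == "ROOT" else str(tot)
--             for lv, tot in zip(relative_levels, totals)]
-- ===== Notes on version B (the rewrite author's own statement) =====
-- stated objective: alternative
-- what changed: Replaces A's single fused loop that writes into a preallocated slot array while mutating a running level with three separate passes: a contributions list, a prefix-sum pass, and a zip-based formatting pass building the output directly.
import Mathlib
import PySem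

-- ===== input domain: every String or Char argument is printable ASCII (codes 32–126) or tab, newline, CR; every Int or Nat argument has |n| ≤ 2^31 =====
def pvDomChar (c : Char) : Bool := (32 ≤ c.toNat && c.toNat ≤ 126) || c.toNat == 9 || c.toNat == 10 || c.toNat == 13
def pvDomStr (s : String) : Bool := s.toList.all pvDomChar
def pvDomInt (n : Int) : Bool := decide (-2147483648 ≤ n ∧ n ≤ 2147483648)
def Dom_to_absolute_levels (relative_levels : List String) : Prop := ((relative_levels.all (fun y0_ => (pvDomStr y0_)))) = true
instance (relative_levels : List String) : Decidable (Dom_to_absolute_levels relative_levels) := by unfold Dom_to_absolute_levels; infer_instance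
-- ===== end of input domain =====

-- B splits A's fused mutate-and-format loop into three passes (contributions, prefix sums, zip-format); equal return values on Pre_ (no-ValueError inputs).


-- ===== PORT A =====
-- literal port of A: foldl over enumerate mutating a preallocated list (placeholder "0"
-- stands for Python's int 0 initializer; every index is overwritten) and a running level.
-- (PySem.Int.ofStr? level).getD 0: 'none' (ValueError) is excluded by Pre_.
def to_absolute_levels (relative_levels : List String) : List String :=
  ((PySem.List.enumerate relative_levels 0).foldl (fun st jl =>
      let j := jl.1
      let level := jl.2
      if level = "-BOS-" ∨ level = "-EOS-" ∨ level = "NONE" then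
        (PySem.List.pySetD st.1 j level, st.2)
      else if level = "ROOT" then
        (PySem.List.pySetD st.1 j "1", st.2 + 1)
      else
        let current := st.2 + ((PySem.Int.ofStr? level).getD 0)
        (PySem.List.pySetD st.1 j (PySem.Int.toStr current), current))
    (List.replicate relative_levels.length "0", (0 : Int))).1

-- ===== PORT B =====
-- B's contribution of one token to the running level (0 for sentinels, 1 for ROOT, int(lv) else)
def pvContrib (lv : String) : Int :=
  if lv = "-BOS-" ∨ lv = "-EOS-" ∨ lv = "NONE" then 0
  else if lv = "ROOT" then 1
  else (PySem.Int.ofStr? lv).getD 0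

-- literal port of B: contributions pass, prefix-sum pass, then a zip-format pass
def to_absolute_levels_alt (relative_levels : List String) : List String :=
  let contribs := relative_levels.map pvContrib
  let totals := (contribs.foldl (fun st c => (st.1 ++ [st.2 + c], st.2 + c))
                  (([] : List Int), (0 : Int))).1
  (relative_levels.zip totals).map (fun p =>
    if p.1 = "-BOS-" ∨ p.1 = "-EOS-" ∨ p.1 = "NONE" then p.1
    else if p.1 = "ROOT" then "1"
    else PySem.Int.toStr p.2)

-- ===== PRECONDITION & SPEC =====
-- Pre_ excludes exactly the inputs where Python's int(level) raises ValueError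
-- (a token that is not a sentinel, not "ROOT", and not int-parseable).
def Pre_to_absolute_levels (relative_levels : List String) : Prop :=
  ∀ lv ∈ relative_levels,
    lv = "-BOS-" ∨ lv = "-EOS-" ∨ lv = "NONE" ∨ lv = "ROOT" ∨ (PySem.Int.ofStr? lv).isSome
instance (relative_levels : List String) : Decidable (Pre_to_absolute_levels relative_levels) := by
  unfold Pre_to_absolute_levels; infer_instance

def pvWitness_to_absolute_levels : List String := ["-BOS-", "ROOT", "1", "-1", "-EOS-"]

def Spec_to_absolute_levels (relative_levels : List String) (out : List String) : Prop := out = to_absolute_levels_alt relative_levels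
instance (relative_levels : List String) (out : List String) : Decidable (Spec_to_absolute_levels relative_levels out) := by unfold Spec_to_absolute_levels; infer_instance

-- ===== CLAIM (what is proved, stated in full; the proofs are below) =====
def Claim_equal_to_absolute_levels : Prop := ∀ (relative_levels : List String), Dom_to_absolute_levels relative_levels → Pre_to_absolute_levels relative_levels → Spec_to_absolute_levels relative_levels (to_absolute_levels relative_levels)

-- ===== LEMMAS AND PROOFS =====

-- reference recursion: the absolute sequence from running level t
def pvGo : List String → Int → List String
  | [], _ => []
  | lv :: rest, t =>
    if lv = "-BOS-" ∨ lv = "-EOS-" ∨ lv = "NONE" then lv :: pvGo rest t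
    else if lv = "ROOT" then "1" :: pvGo rest (t + 1)
    else PySem.Int.toStr (t + (PySem.Int.ofStr? lv).getD 0) ::
         pvGo rest (t + (PySem.Int.ofStr? lv).getD 0)

-- prefix sums from running total t
def pvScan : List Int → Int → List Int
  | [], _ => []
  | c :: cs, t => (t + c) :: pvScan cs (t + c)

lemma pvScan_foldl (cs : List Int) (acc : List Int) (t : Int) :
    (cs.foldl (fun st c => (st.1 ++ [st.2 + c], st.2 + c)) (acc, t)).1 = acc ++ pvScan cs t := by
  induction cs generalizing acc t with
  | nil => simp [pvScan]
  | cons c cs ih => simp [List.foldl, pvScan, ih]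

lemma alt_eq_go (xs : List String) (t : Int) :
    (xs.zip (pvScan (xs.map pvContrib) t)).map (fun p =>
      if p.1 = "-BOS-" ∨ p.1 = "-EOS-" ∨ p.1 = "NONE" then p.1
      else if p.1 = "ROOT" then "1"
      else PySem.Int.toStr p.2) = pvGo xs t := by
  induction xs generalizing t with
  | nil => simp [pvGo]
  | cons lv rest ih =>
    by_cases hs : lv = "-BOS-" ∨ lv = "-EOS-" ∨ lv = "NONE"
    · simp [pvScan, pvGo, pvContrib, hs, ih]
    · by_cases hr : lv = "ROOT"
      · simp [pvScan, pvGo, pvContrib, hr, ih]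
      · simp [pvScan, pvGo, pvContrib, hs, hr, ih]

lemma a_eq_go (rest : List String) (pre : List String) (t : Int) :
    ((PySem.List.enumerate rest (pre.length : Int)).foldl (fun st jl =>
        let j := jl.1
        let level := jl.2
        if level = "-BOS-" ∨ level = "-EOS-" ∨ level = "NONE" then
          (PySem.List.pySetD st.1 j level, st.2)
        else if level = "ROOT" then
          (PySem.List.pySetD st.1 j "1", st.2 + 1)
        else
          let current := st.2 + ((PySem.Int.ofStr? level).getD 0)
          (PySem.List.pySetD st.1 j (PySem.Int.toStr current), current))
      (pre ++ List.replicate rest.length "0", t)).1 = pre ++ pvGo rest t := by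
  induction rest generalizing pre t with
  | nil => simp [PySem.List.enumerate, pvGo]
  | cons lv rest ih =>
    have hstep : ∀ v : String,
        PySem.List.pySetD (pre ++ List.replicate (lv :: rest).length "0")
          (pre.length : Int) v = (pre ++ [v]) ++ List.replicate rest.length "0" := by
      intro v
      simp [List.replicate_succ]
    have henum : PySem.List.enumerate (lv :: rest) (pre.length : Int)
        = ((pre.length : Int), lv) :: PySem.List.enumerate rest (((pre ++ [lv]).length : Nat) : Int) := by
      simp [PySem.List.enumerate]
    by_cases hs : lv = "-BOS-" ∨ lv = "-EOS-" ∨ lv = "NONE"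
    · rw [henum, List.foldl_cons]
      have := ih (pre ++ [lv]) t
      simpa [hs, hstep, pvGo] using this
    · by_cases hr : lv = "ROOT"
      · rw [henum, List.foldl_cons]
        have := ih (pre ++ ["1"]) (t + 1)
        simpa [hs, hr, hstep, pvGo] using this
      · rw [henum, List.foldl_cons]
        have := ih (pre ++ [PySem.Int.toStr (t + ((PySem.Int.ofStr? lv).getD 0))])
          (t + ((PySem.Int.ofStr? lv).getD 0))
        simpa [hs, hr, hstep, pvGo] using this

-- ===== VERDICT (by name: the statement is the Claim_ definition above) =====
theorem to_absolute_levels_spec : Claim_equal_to_absolute_levels := by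
  intro xs _ _
  unfold Spec_to_absolute_levels to_absolute_levels to_absolute_levels_alt
  dsimp only
  rw [pvScan_foldl, List.nil_append, alt_eq_go]
  have := a_eq_go xs [] 0
  simpa using this
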